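-- pv_equiv track=rewrite | github.com/Michael-Tanzer/sweepd | sweep/core.py | param_line_to_dict
-- ===== SOURCE A (Python) =====
-- def split_param_line(param_line: str) -> list[str]:
--     """
--     Splits a param line on commas that are not inside single or double quotes.
--     Returns a list of segments (not stripped).
--     """
--     segments = []
--     current = []
--     in_single = False
--     in_double = False
--     for ch in param_line:
--         if ch == "'" and not in_double:
--             in_single = not in_single
--             current.append(ch)
--         elif ch == '"' and not in_single:
--             in_double = not in_double
--             current.append(ch)
--         elif ch == "," and not in_single and not in_double:
--             segments.append("".join(current))
--             current = []
--         else: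
--             current.append(ch)
--     if current:
--         segments.append("".join(current))
--     return segments
--
-- def param_line_to_dict(param_line: str) -> dict[str, str]:
--     """
--     Parses a param line (key=val,key2=val2) into a dict. Used for table UI (one key per column).
--     """
--     out = {}
--     for p in split_param_line(param_line):
--         p = p.strip()
--         if not p:
--             continue
--         if "=" in p:
--             k, _, v = p.partition("=")
--             out[k.strip()] = v.strip()
--         else:
--             out[p] = ""
--     return out
-- ===== SOURCE B (Python) =====
-- def param_line_to_dict(param_line: str) -> dict[str, str]:
--     """
--     Parses a param line (key=val,key2=val2) into a dict in ONE character pass: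
--     no intermediate segment list, a state machine with key/value buffers.
--     """
--     out = {}
--     key, val = [], []
--     seen_eq = False
--     in_single = in_double = False
--
--     def finalize():
--         k = "".join(key).strip()
--         if seen_eq:
--             out[k] = "".join(val).strip()
--         elif k:
--             out[k] = ""
--
--     for ch in param_line:
--         if ch == "'" and not in_double:
--             in_single = not in_single
--         elif ch == '"' and not in_single:
--             in_double = not in_double
--         elif ch == "," and not in_single and not in_double:
--             finalize()
--             key, val = [], []
--             seen_eq = False
--             continue
--         elif ch == "=" and not seen_eq:
--             seen_eq = True
--             continue
--         (val if seen_eq else key).append(ch)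
--     finalize()
--     return out
-- ===== Notes on version B (the rewrite author's own statement) =====
-- stated objective: alternative
-- what changed: Replaced the two-pass split-into-segments-then-parse-each-segment design by a single character-by-character state machine with key/value buffers and a seen-equals flag, finalizing an entry at each unquoted comma; no intermediate segment list is built.
import Mathlib
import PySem

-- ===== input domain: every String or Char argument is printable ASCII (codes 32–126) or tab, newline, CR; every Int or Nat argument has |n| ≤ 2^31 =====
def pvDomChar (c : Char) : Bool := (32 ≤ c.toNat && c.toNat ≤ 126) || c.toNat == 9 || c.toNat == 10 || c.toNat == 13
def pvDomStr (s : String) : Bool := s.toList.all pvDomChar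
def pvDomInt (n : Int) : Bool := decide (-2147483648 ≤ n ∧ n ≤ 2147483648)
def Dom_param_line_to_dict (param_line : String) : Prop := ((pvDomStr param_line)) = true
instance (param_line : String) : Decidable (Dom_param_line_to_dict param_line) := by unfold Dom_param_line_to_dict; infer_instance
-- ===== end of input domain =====

-- B fuses A's split-then-parse two-pass into one character-by-character state machine
-- with key/value buffers (alternative decomposition, same asymptotic cost).


-- ===== PORT A =====
-- one step of split_param_line's loop; current is built by append, as in Python
def pvSplitStep (st : List (List Char) × List Char × Bool × Bool) (c : Char) :
    List (List Char) × List Char × Bool × Bool :=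
  let (segs, current, inS, inD) := st
  if c = '\'' ∧ inD = false then (segs, current ++ [c], !inS, inD)
  else if c = '"' ∧ inS = false then (segs, current ++ [c], inS, !inD)
  else if c = ',' ∧ inS = false ∧ inD = false then (segs ++ [current], [], inS, inD)
  else (segs, current ++ [c], inS, inD)

-- split_param_line (helper of A), on the character-list representation
def pvSplitParamLine (cs : List Char) : List (List Char) :=
  let st := cs.foldl pvSplitStep ([], [], false, false)
  if st.2.1 = [] then st.1 else st.1 ++ [st.2.1]

-- body of A's dict loop: p.strip(); skip if empty; partition on first '=' (span, exact hand port)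
def pvSegStep (out : PySem.Dict (List Char) (List Char)) (seg : List Char) :
    PySem.Dict (List Char) (List Char) :=
  let p := PySem.Chars.strip seg
  if p = [] then out
  else if PySem.Chars.isIn ['='] p then
    let k := p.takeWhile (fun c => ¬ c = '=')
    let v := (p.dropWhile (fun c => ¬ c = '=')).tail
    out.insert (PySem.Chars.strip k) (PySem.Chars.strip v)
  else out.insert p []

def param_line_to_dict (param_line : String) : List (String × String) :=
  let out := (pvSplitParamLine param_line.toList).foldl pvSegStep PySem.Dict.empty
  out.items.map (fun kv => (String.ofList kv.1, String.ofList kv.2))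

-- ===== PORT B =====
-- finalize(): strip the buffers and emit one entry (skipped when no '=' was seen and the key is blank)
def pvFinalize (out : PySem.Dict (List Char) (List Char)) (key val : List Char) (seenEq : Bool) :
    PySem.Dict (List Char) (List Char) :=
  let k := PySem.Chars.strip key
  if seenEq then out.insert k (PySem.Chars.strip val)
  else if k = [] then out else out.insert k []

-- B's single loop: route chars to the key or value buffer, finalize on unquoted commas and at the end
def pvBLoop : List Char → PySem.Dict (List Char) (List Char) → List Char → List Char →
    Bool → Bool → Bool → PySem.Dict (List Char) (List Char)
  | [], out, key, val, seenEq, _, _ => pvFinalize out key val seenEq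
  | c :: cs, out, key, val, seenEq, inS, inD =>
    if c = '\'' ∧ inD = false then
      if seenEq then pvBLoop cs out key (val ++ [c]) seenEq (!inS) inD
      else pvBLoop cs out (key ++ [c]) val seenEq (!inS) inD
    else if c = '"' ∧ inS = false then
      if seenEq then pvBLoop cs out key (val ++ [c]) seenEq inS (!inD)
      else pvBLoop cs out (key ++ [c]) val seenEq inS (!inD)
    else if c = ',' ∧ inS = false ∧ inD = false then
      pvBLoop cs (pvFinalize out key val seenEq) [] [] false inS inD
    else if c = '=' ∧ seenEq = false then
      pvBLoop cs out key val true inS inD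
    else
      if seenEq then pvBLoop cs out key (val ++ [c]) seenEq inS inD
      else pvBLoop cs out (key ++ [c]) val seenEq inS inD

def param_line_to_dict_alt (param_line : String) : List (String × String) :=
  let out := pvBLoop param_line.toList PySem.Dict.empty [] [] false false false
  out.items.map (fun kv => (String.ofList kv.1, String.ofList kv.2))

-- ===== PRECONDITION & SPEC =====
def Spec_param_line_to_dict (param_line : String) (out : List (String × String)) : Prop := out = param_line_to_dict_alt param_line
instance (param_line : String) (out : List (String × String)) : Decidable (Spec_param_line_to_dict param_line out) := by unfold Spec_param_line_to_dict; infer_instance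

-- ===== CLAIM (what is proved, stated in full; the proofs are below) =====
def Claim_equal_param_line_to_dict : Prop := ∀ (param_line : String), Dom_param_line_to_dict param_line → Spec_param_line_to_dict param_line (param_line_to_dict param_line)

-- ===== LEMMAS AND PROOFS =====

-- proof-only helper: fold A's dict step over the segments collected so far, then over the pending current buffer
def pvFinish (out : PySem.Dict (List Char) (List Char))
    (st : List (List Char) × List Char × Bool × Bool) : PySem.Dict (List Char) (List Char) :=
  let out' := st.1.foldl pvSegStep out
  if st.2.1 = [] then out' else pvSegStep out' st.2.1

lemma pv_isspace_eq : PySem.Chars.isspace '=' = false := by decide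

lemma pv_dropWhile_idem {p : Char → Bool} (l : List Char) :
    List.dropWhile p (List.dropWhile p l) = List.dropWhile p l := by
  induction l with
  | nil => rfl
  | cons c t ih =>
    by_cases h : p c = true
    · simpa [List.dropWhile_cons, h] using ih
    · simp [h]

lemma pv_lstrip_append (a b : List Char) :
    PySem.Chars.lstrip (a ++ '=' :: b) = PySem.Chars.lstrip a ++ '=' :: b := by
  simp only [PySem.Chars.lstrip, List.dropWhile_append]
  split
  · next h =>
    rw [List.isEmpty_iff] at h
    simp [h, pv_isspace_eq]
  · rfl

lemma pv_rstrip_eq_nil_iff (b : List Char) :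
    PySem.Chars.rstrip b = [] ↔ List.dropWhile PySem.Chars.isspace b.reverse = [] := by
  simp [PySem.Chars.rstrip]

lemma pv_rstrip_append (a b : List Char) :
    PySem.Chars.rstrip (a ++ '=' :: b) = a ++ '=' :: PySem.Chars.rstrip b := by
  simp only [PySem.Chars.rstrip, List.reverse_append, List.reverse_cons]
  rw [show b.reverse ++ ['='] ++ a.reverse = b.reverse ++ ('=' :: a.reverse) by simp,
    List.dropWhile_append]
  split
  · next h =>
    rw [List.isEmpty_iff] at h
    simp [pv_isspace_eq, h]
  · simp

lemma pv_strip_append (key val : List Char) :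
    PySem.Chars.strip (key ++ '=' :: val) =
      PySem.Chars.lstrip key ++ '=' :: PySem.Chars.rstrip val := by
  simp only [PySem.Chars.strip, pv_lstrip_append, pv_rstrip_append]

lemma pv_strip_lstrip (l : List Char) : PySem.Chars.strip (PySem.Chars.lstrip l) = PySem.Chars.strip l := by
  simp only [PySem.Chars.strip, PySem.Chars.lstrip, pv_dropWhile_idem]

lemma pv_rstrip_cons (c : Char) (t : List Char) :
    PySem.Chars.rstrip (c :: t) =
      if PySem.Chars.rstrip t = [] then (if PySem.Chars.isspace c then [] else [c])
      else c :: PySem.Chars.rstrip t := by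
  simp only [PySem.Chars.rstrip, List.reverse_cons, List.dropWhile_append]
  by_cases h : List.dropWhile PySem.Chars.isspace t.reverse = []
  · rw [if_pos (by simp [h]), if_pos (by simpa [pv_rstrip_eq_nil_iff] using h)]
    by_cases hc : PySem.Chars.isspace c <;> simp [hc]
  · rw [if_neg (by simpa [List.isEmpty_iff] using h),
      if_neg (by simpa [pv_rstrip_eq_nil_iff] using h)]
    simp

lemma pv_lstrip_rstrip_comm (l : List Char) :
    PySem.Chars.lstrip (PySem.Chars.rstrip l) = PySem.Chars.rstrip (PySem.Chars.lstrip l) := by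
  induction l with
  | nil => rfl
  | cons c t ih =>
    by_cases hc : PySem.Chars.isspace c = true
    · rw [pv_rstrip_cons]
      by_cases ht : PySem.Chars.rstrip t = []
      · simp only [ht, if_true, hc, if_true]
        have : PySem.Chars.lstrip (c :: t) = PySem.Chars.lstrip t := by
          simp [PySem.Chars.lstrip, hc]
        rw [this, ← ih, ht]
      · simp only [ht, if_false]
        have h1 : PySem.Chars.lstrip (c :: PySem.Chars.rstrip t) = PySem.Chars.lstrip (PySem.Chars.rstrip t) := by
          simp [PySem.Chars.lstrip, hc]
        have h2 : PySem.Chars.lstrip (c :: t) = PySem.Chars.lstrip t := by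
          simp [PySem.Chars.lstrip, hc]
        rw [h1, h2, ih]
    · have h2 : PySem.Chars.lstrip (c :: t) = c :: t := by
        simp [PySem.Chars.lstrip, hc]
      rw [h2, pv_rstrip_cons]
      by_cases ht : PySem.Chars.rstrip t = []
      · rw [if_pos ht, if_neg (by simpa using hc)]
        simp [PySem.Chars.lstrip, hc]
      · rw [if_neg ht]
        simp [PySem.Chars.lstrip, hc]

lemma pv_rstrip_idem (l : List Char) :
    PySem.Chars.rstrip (PySem.Chars.rstrip l) = PySem.Chars.rstrip l := by
  simp only [PySem.Chars.rstrip, List.reverse_reverse, pv_dropWhile_idem]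

lemma pv_strip_rstrip (l : List Char) : PySem.Chars.strip (PySem.Chars.rstrip l) = PySem.Chars.strip l := by
  simp only [PySem.Chars.strip]
  rw [pv_lstrip_rstrip_comm, pv_rstrip_idem]

lemma pv_mem_lstrip {c : Char} {l : List Char} (h : c ∈ PySem.Chars.lstrip l) : c ∈ l :=
  (List.dropWhile_sublist _).subset h

lemma pv_mem_strip {c : Char} {l : List Char} (h : c ∈ PySem.Chars.strip l) : c ∈ l := by
  apply pv_mem_lstrip
  have : c ∈ PySem.Chars.rstrip (PySem.Chars.lstrip l) := h
  simp only [PySem.Chars.rstrip] at this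
  rw [List.mem_reverse] at this
  have := (List.dropWhile_sublist _).subset this
  rwa [List.mem_reverse] at this

lemma pv_isIn_singleton (c : Char) (l : List Char) :
    PySem.Chars.isIn [c] l = true ↔ c ∈ l := by
  rw [PySem.Chars.isIn_iff_infix]
  constructor
  · intro h
    exact h.sublist.subset (List.mem_singleton_self c)
  · intro h
    obtain ⟨s, t, rfl⟩ := List.append_of_mem h
    exact ⟨s, t, by simp⟩

lemma pv_takeWhile_all {q : Char → Bool} (a : List Char) (c : Char) (b : List Char)
    (ha : ∀ x ∈ a, q x = true) (hc : q c = false) :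
    (a ++ c :: b).takeWhile q = a ∧ (a ++ c :: b).dropWhile q = c :: b := by
  induction a with
  | nil => simp [List.takeWhile_cons, hc]
  | cons x t ih =>
    have hx : q x = true := ha x (List.mem_cons_self)
    have := ih (fun y hy => ha y (List.mem_cons_of_mem _ hy))
    simp [List.dropWhile_cons, hx, this.1, this.2]

-- the crux: A's per-segment step on B's reconstructed segment equals B's finalize
lemma pv_finalize_eq (out : PySem.Dict (List Char) (List Char)) (key val : List Char)
    (seenEq : Bool) (hk : '=' ∉ key) (hv : seenEq = false → val = []) :
    pvSegStep out (key ++ (if seenEq then '=' :: val else [])) = pvFinalize out key val seenEq := by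
  cases seenEq with
  | true =>
    simp only [if_true]
    have hne : '=' ∉ PySem.Chars.lstrip key := fun h => hk (pv_mem_lstrip h)
    have hsplit := pv_takeWhile_all (q := fun c => !decide (c = '='))
      (PySem.Chars.lstrip key) '=' (PySem.Chars.rstrip val)
      (fun x hx => by simp; rintro rfl; exact hne hx) (by simp)
    simp only [pvSegStep, pv_strip_append]
    rw [if_neg (by simp)]
    rw [if_pos (by rw [pv_isIn_singleton]; simp)]
    have htake : (PySem.Chars.lstrip key ++ '=' :: PySem.Chars.rstrip val).takeWhile
        (fun c => ¬ c = '=') = PySem.Chars.lstrip key := by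
      simpa using hsplit.1
    have hdrop : (PySem.Chars.lstrip key ++ '=' :: PySem.Chars.rstrip val).dropWhile
        (fun c => ¬ c = '=') = '=' :: PySem.Chars.rstrip val := by
      simpa using hsplit.2
    rw [htake, hdrop]
    simp only [List.tail_cons, pv_strip_lstrip, pv_strip_rstrip]
    rfl
  | false =>
    rw [hv rfl]
    simp only [Bool.false_eq_true, if_false, List.append_nil]
    by_cases hp : PySem.Chars.strip key = []
    · simp [pvSegStep, pvFinalize, hp]
    · have hni : PySem.Chars.isIn ['='] (PySem.Chars.strip key) = false := by
        rw [← Bool.not_eq_true, pv_isIn_singleton]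
        exact fun h => hk (pv_mem_strip h)
      simp [pvSegStep, pvFinalize, hp, hni]

lemma pv_split_segs (cs : List Char) :
    ∀ (segs : List (List Char)) (cur : List Char) (s d : Bool),
      cs.foldl pvSplitStep (segs, cur, s, d) =
        (segs ++ (cs.foldl pvSplitStep ([], cur, s, d)).1,
          (cs.foldl pvSplitStep ([], cur, s, d)).2) := by
  induction cs with
  | nil => intro segs cur s d; simp
  | cons c t ih =>
    intro segs cur s d
    simp only [List.foldl_cons]
    show t.foldl pvSplitStep (pvSplitStep (segs, cur, s, d) c) =
      (segs ++ (t.foldl pvSplitStep (pvSplitStep ([], cur, s, d) c)).1, _)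
    simp only [pvSplitStep]
    split_ifs with h1 h2 h3
    · exact ih segs (cur ++ [c]) (!s) d
    · exact ih segs (cur ++ [c]) s (!d)
    · simp only [List.nil_append]
      rw [ih (segs ++ [cur]) [] s d, ih [cur] [] s d]
      simp
    · exact ih segs (cur ++ [c]) s d

-- the loop invariant: B's fused loop equals A's remaining split + dict fold
lemma pv_bloop_eq (cs : List Char) :
    ∀ (out : PySem.Dict (List Char) (List Char)) (key val : List Char) (seenEq inS inD : Bool),
      '=' ∉ key → (seenEq = false → val = []) →
      pvBLoop cs out key val seenEq inS inD =
        pvFinish out (cs.foldl pvSplitStep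
          ([], key ++ (if seenEq then '=' :: val else []), inS, inD)) := by
  induction cs with
  | nil =>
    intro out key val seenEq inS inD hk hv
    simp only [List.foldl_nil, pvBLoop]
    rw [pvFinish]
    cases seenEq with
    | true =>
      rw [if_neg (by simp)]
      simpa using (pv_finalize_eq out key val true hk hv).symm
    | false =>
      rw [hv rfl] at *
      by_cases hkey : key = []
      · subst hkey
        simp [pvFinalize, PySem.Chars.strip, PySem.Chars.lstrip, PySem.Chars.rstrip]
      · rw [if_neg (by simpa using hkey)]
        simpa using (pv_finalize_eq out key [] false hk (fun _ => rfl)).symm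
  | cons c t ih =>
    intro out key val seenEq inS inD hk hv
    have htf : ((true : Bool) = false) = False := by simp
    have hft : ((false : Bool) = true) = False := by simp
    rw [List.foldl_cons]
    cases seenEq with
    | true =>
      simp only [pvBLoop, pvSplitStep, htf, if_true, and_false, if_false]
      by_cases h1 : c = '\'' ∧ inD = false
      · rw [if_pos h1, if_pos h1, ih out key (val ++ [c]) true (!inS) inD hk (by simp)]
        simp
      · rw [if_neg h1, if_neg h1]
        by_cases h2 : c = '"' ∧ inS = false
        · rw [if_pos h2, if_pos h2, ih out key (val ++ [c]) true inS (!inD) hk (by simp)]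
          simp
        · rw [if_neg h2, if_neg h2]
          by_cases h3 : c = ',' ∧ inS = false ∧ inD = false
          · rw [if_pos h3, if_pos h3,
              ih (pvFinalize out key val true) [] [] false inS inD (by simp) (fun _ => rfl)]
            simp only [hft, if_false, List.nil_append]
            rw [pv_split_segs t [key ++ '=' :: val] [] inS inD]
            have hfe := pv_finalize_eq out key val true hk (by simp)
            simp only [if_true] at hfe
            simp [pvFinish, hfe]
          · rw [if_neg h3, if_neg h3, ih out key (val ++ [c]) true inS inD hk (by simp)]
            simp
    | false =>
      obtain rfl : val = [] := hv rfl
      simp only [pvBLoop, pvSplitStep, hft, if_false, and_true, List.append_nil]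
      by_cases h1 : c = '\'' ∧ inD = false
      · have hc : ¬ c = '=' := by rintro rfl; exact absurd h1.1 (by decide)
        rw [if_pos h1, if_pos h1,
          ih out (key ++ [c]) [] false (!inS) inD
            (by simp [hk]; exact fun h => hc h.symm) (fun _ => rfl)]
        simp
      · rw [if_neg h1, if_neg h1]
        by_cases h2 : c = '"' ∧ inS = false
        · have hc : ¬ c = '=' := by rintro rfl; exact absurd h2.1 (by decide)
          rw [if_pos h2, if_pos h2,
            ih out (key ++ [c]) [] false inS (!inD)
              (by simp [hk]; exact fun h => hc h.symm) (fun _ => rfl)]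
          simp
        · rw [if_neg h2, if_neg h2]
          by_cases h3 : c = ',' ∧ inS = false ∧ inD = false
          · rw [if_pos h3, if_pos h3,
              ih (pvFinalize out key [] false) [] [] false inS inD (by simp) (fun _ => rfl)]
            simp only [hft, if_false, List.nil_append]
            rw [pv_split_segs t [key] [] inS inD]
            have hfe := pv_finalize_eq out key [] false hk (fun _ => rfl)
            simp only [hft, if_false, List.append_nil] at hfe
            simp [pvFinish, hfe]
          · rw [if_neg h3, if_neg h3]
            by_cases h4 : c = '='
            · rw [if_pos h4, ih out key [] true inS inD hk (by simp)]
              subst h4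
              simp
            · rw [if_neg h4,
                ih out (key ++ [c]) [] false inS inD
                  (by simp [hk]; exact fun h => h4 h.symm) (fun _ => rfl)]
              simp

-- ===== VERDICT (by name: the statement is the Claim_ definition above) =====
theorem param_line_to_dict_spec : Claim_equal_param_line_to_dict := by
  intro s _
  show param_line_to_dict s = param_line_to_dict_alt s
  have hB := pv_bloop_eq s.toList PySem.Dict.empty [] [] false false false
    (by simp) (fun _ => rfl)
  simp only [Bool.false_eq_true, if_false, List.nil_append] at hB
  have hA : (pvSplitParamLine s.toList).foldl pvSegStep PySem.Dict.empty =
      pvFinish PySem.Dict.empty (s.toList.foldl pvSplitStep ([], [], false, false)) := by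
    rw [pvSplitParamLine, pvFinish]
    split
    · rfl
    · simp [List.foldl_append]
  rw [param_line_to_dict, param_line_to_dict_alt, hB, hA]
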